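-- pv_equiv track=rewrite | github.com/wumusill/Programmers | Lv2/defense_game.py | solution
-- ===== SOURCE A (Python) =====
-- import heapq as hq
--
-- def solution(n, k, enemy):
--     # 무적권 개수만큼 힙 생성
--     q = enemy[:k]
--     hq.heapify(q)
--
--     # 그 다음 라운드
--     for idx in range(k,len(enemy)):
--         # heappushpop : item을 push 한 뒤 pop, heappush(), heappop()을 하는 것보다 효율적으로 처리
--         # 병사 소모가 가장 적은 순으로 라운드 클리어 처리
--         n -= hq.heappushpop(q, enemy[idx])
--
--         # 병사가 모자라면, 이전 라운드까지 반환
--         if n < 0: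
--             return idx
--     # 병사가 남거나 딱 맞으면 모두 클리어
--     return len(enemy)
-- ===== SOURCE B (Python) =====
-- def solution(n, k, enemy):
--     # round r (0-based) fails iff the minimal soldiers spent to clear rounds
--     # 0..r -- the sum of the r+1-k smallest enemy counts among them (the k
--     # largest are absorbed by the k passes) -- exceeds n
--     for r in range(k, len(enemy)):
--         if sum(sorted(enemy[:r + 1])[:r + 1 - k]) > n:
--             return r
--     return len(enemy)
-- ===== Notes on version B (the rewrite author's own statement) =====
-- stated objective: simpler
-- what changed: Replaces the incremental min-heap of the k protected rounds by a direct per-round check that recomputes the minimal spend as the sum of the r+1-k smallest values of the prefix (sort the prefix, drop the k largest); no heap, no mutable pool.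
-- outside the precondition, e.g. on solution(3, -1, [5, 1, 1]): A returns 2, B returns 0
import Mathlib
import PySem

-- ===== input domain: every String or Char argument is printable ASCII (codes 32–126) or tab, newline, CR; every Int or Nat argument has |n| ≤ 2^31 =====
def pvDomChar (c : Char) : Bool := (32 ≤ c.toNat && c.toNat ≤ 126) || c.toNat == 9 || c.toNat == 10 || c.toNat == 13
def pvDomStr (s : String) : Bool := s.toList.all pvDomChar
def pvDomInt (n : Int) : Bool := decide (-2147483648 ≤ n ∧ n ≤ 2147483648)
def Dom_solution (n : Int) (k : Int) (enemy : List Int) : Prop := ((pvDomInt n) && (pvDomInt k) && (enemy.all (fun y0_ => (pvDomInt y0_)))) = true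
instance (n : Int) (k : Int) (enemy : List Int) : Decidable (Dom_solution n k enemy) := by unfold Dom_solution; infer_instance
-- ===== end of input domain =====

-- B replaces A's incremental min-heap of the k protected rounds by a direct per-round
-- check (sum of the r+1-k smallest values of the sorted prefix): simpler, not faster.

-- ===== PORT A =====
-- A uses heapq; heapify/heappushpop are transliterated below from CPython's
-- pure-Python heapq (_siftup/_siftdown).  heap[i] is ported as List.getD i 0,
-- exact here because every index the algorithm reads is in range.

-- _siftdown's while loop: bubble newitem up from pos toward startpos
def siftdownLoop (heap : List Int) (startpos : Nat) (pos : Nat) (newitem : Int) :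
    List Int × Nat :=
  if h : startpos < pos then
    let parentpos := (pos - 1) / 2
    let parent := heap.getD parentpos 0
    if newitem < parent then
      siftdownLoop (heap.set pos parent) startpos parentpos newitem
    else (heap, pos)
  else (heap, pos)
termination_by pos
decreasing_by exact Nat.lt_of_le_of_lt (Nat.div_le_self _ _) (by omega)

-- heapq._siftdown(heap, startpos, pos)
def siftdown (heap : List Int) (startpos pos : Nat) : List Int :=
  let newitem := heap.getD pos 0
  let r := siftdownLoop heap startpos pos newitem
  r.1.set r.2 newitem

-- _siftup's while loop: move the smaller child up until reaching a leaf
def siftupLoop (heap : List Int) (pos : Nat) : List Int × Nat :=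
  if h : 2 * pos + 1 < heap.length then
    let childpos :=
      if 2 * pos + 2 < heap.length ∧ ¬ (heap.getD (2 * pos + 1) 0 < heap.getD (2 * pos + 2) 0)
      then 2 * pos + 2 else 2 * pos + 1
    siftupLoop (heap.set pos (heap.getD childpos 0)) childpos
  else (heap, pos)
termination_by heap.length - pos
decreasing_by simp only [List.length_set]; split <;> omega

-- heapq._siftup(heap, pos)
def siftup (heap : List Int) (pos : Nat) : List Int :=
  let newitem := heap.getD pos 0
  let r := siftupLoop heap pos
  siftdown (r.1.set r.2 newitem) pos r.2

-- heapq.heapify(x): for i in reversed(range(len(x)//2)): _siftup(x, i)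
def heapify (x : List Int) : List Int :=
  ((List.range (x.length / 2)).reverse).foldl (fun h i => siftup h i) x

-- heapq.heappushpop(heap, item): returns (new heap, popped value)
def heappushpop (heap : List Int) (item : Int) : List Int × Int :=
  if heap ≠ [] ∧ heap.getD 0 0 < item then
    (siftup (heap.set 0 item) 0, heap.getD 0 0)
  else (heap, item)

-- the for-idx loop of A with its early return
def solLoop (q : List Int) (n : Int) (enemy : List Int) (idxs : List Int) : Int :=
  match idxs with
  | [] => (enemy.length : Int)
  | idx :: rest =>
      let p := heappushpop q (PySem.List.pyGetD enemy idx 0)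
      let n' := n - p.2
      if n' < 0 then idx else solLoop p.1 n' enemy rest

def solution (n : Int) (k : Int) (enemy : List Int) : Int :=
  solLoop (heapify (PySem.List.slice enemy none (some k))) n enemy
    (PySem.List.pyRange k (enemy.length : Int) 1)

-- ===== PORT B =====
def altLoop (n : Int) (k : Int) (enemy : List Int) (rs : List Int) : Int :=
  match rs with
  | [] => (enemy.length : Int)
  | r :: rest =>
      if (PySem.List.slice
            (PySem.List.sorted (PySem.List.slice enemy none (some (r + 1))) id false)
            none (some (r + 1 - k))).sum > n
      then r else altLoop n k enemy rest

def solution_alt (n : Int) (k : Int) (enemy : List Int) : Int :=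
  altLoop n k enemy (PySem.List.pyRange k (enemy.length : Int) 1)

-- ===== PRECONDITION & SPEC =====
-- Pre_ excludes k < 0, where A's range(k, len(enemy)) feeds negative indices to
-- enemy[idx] and the negative-index wraparound re-reads the tail of the list —
-- an artefact of A's implementation that B treats as ordinary rounds instead.
def Pre_solution (n : Int) (k : Int) (enemy : List Int) : Prop := 0 ≤ k
instance (n : Int) (k : Int) (enemy : List Int) : Decidable (Pre_solution n k enemy) := by unfold Pre_solution; infer_instance
def pvWitness_solution : Int × Int × List Int := (7, 1, [4, 2, 4, 5, 3, 3, 1])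

def Spec_solution (n : Int) (k : Int) (enemy : List Int) (out : Int) : Prop := out = solution_alt n k enemy
instance (n : Int) (k : Int) (enemy : List Int) (out : Int) : Decidable (Spec_solution n k enemy out) := by unfold Spec_solution; infer_instance

-- ===== CLAIM (what is proved, stated in full; the proofs are below) =====
def Claim_equal_solution : Prop := ∀ (n : Int) (k : Int) (enemy : List Int), Dom_solution n k enemy → Pre_solution n k enemy → Spec_solution n k enemy (solution n k enemy)

-- ===== LEMMAS AND PROOFS =====

-- edge into position c holds ((c-1)/2 is c's parent)
def Ehp (h : List Int) (c : Nat) : Prop := h.getD ((c - 1) / 2) 0 ≤ h.getD c 0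

-- heap order on all edges whose parent index is ≥ m
def PV (h : List Int) (m : Nat) : Prop :=
  ∀ c, 1 ≤ c → c < h.length → m ≤ (c - 1) / 2 → Ehp h c

-- descendant relation for heap indices
inductive Desc : Nat → Nat → Prop
  | refl (s : Nat) : Desc s s
  | left {s c : Nat} : Desc s c → Desc s (2 * c + 1)
  | right {s c : Nat} : Desc s c → Desc s (2 * c + 2)

def msort (l : List Int) : List Int := PySem.List.sorted l id false

theorem desc_le {s p : Nat} (h : Desc s p) : s ≤ p := by
  induction h <;> omega

theorem desc_parent {s p : Nat} (h : Desc s p) (hlt : s < p) : Desc s ((p - 1) / 2) := by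
  cases h with
  | refl => omega
  | left h =>
      rename_i c
      have e : (2 * c + 1 - 1) / 2 = c := by omega
      rw [e]; exact h
  | right h =>
      rename_i c
      have e : (2 * c + 2 - 1) / 2 = c := by omega
      rw [e]; exact h

theorem getD_cons_set_perm (t : List Int) (m : Nat) (x : Int) (h : m < t.length) :
    (t.getD m 0 :: t.set m x).Perm (x :: t) := by
  induction t generalizing m with
  | nil => simp at h
  | cons a t ih =>
    cases m with
    | zero => simpa using List.Perm.swap x a t
    | succ m =>
      simp only [List.getD_cons_succ, List.set_cons_succ]
      exact ((List.Perm.swap a (t.getD m 0) (t.set m x)).trans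
        (((ih m (by simpa using h)).cons a).trans (List.Perm.swap x a t)))

theorem desc_trans {a b c : Nat} (h1 : Desc a b) (h2 : Desc b c) : Desc a c := by
  induction h2 with
  | refl => exact h1
  | left _ ih => exact Desc.left ih
  | right _ ih => exact Desc.right ih

theorem set_set_perm (l : List Int) (i j : Nat) (x : Int)
    (hi : i < l.length) (hj : j < l.length) (hij : i ≠ j) :
    ((l.set i (l.getD j 0)).set j x).Perm (l.set i x) := by
  induction l generalizing i j with
  | nil => simp at hi
  | cons a t ih =>
    match i, j with
    | 0, 0 => omega
    | 0, m + 1 =>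
      simp only [List.getD_cons_succ, List.set_cons_zero, List.set_cons_succ]
      exact getD_cons_set_perm t m x (by simpa using hj)
    | p + 1, 0 =>
      simp only [List.getD_cons_zero, List.set_cons_zero, List.set_cons_succ]
      have hm : p < t.length := by simpa using hi
      have h1 : (t.getD p 0 :: (x :: t.set p a)).Perm (x :: a :: t) :=
        (List.Perm.swap x (t.getD p 0) (t.set p a)).trans
          ((getD_cons_set_perm t p a hm).cons x)
      have h2 : (t.getD p 0 :: (a :: t.set p x)).Perm (x :: a :: t) :=
        ((List.Perm.swap a (t.getD p 0) (t.set p x)).trans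
          ((getD_cons_set_perm t p x hm).cons a)).trans (List.Perm.swap x a t)
      exact List.Perm.cons_inv (h1.trans h2.symm)
    | p + 1, m + 1 =>
      simp only [List.getD_cons_succ, List.set_cons_succ]
      exact (ih p m (by simpa using hi) (by simpa using hj) (by omega)).cons a

theorem root_min {h : List Int} (hv : PV h 0) : ∀ i, i < h.length → h.getD 0 0 ≤ h.getD i 0 := by
  intro i
  induction i using Nat.strong_induction_on with
  | _ i ih =>
    intro hlen
    rcases Nat.eq_zero_or_pos i with h0 | h0
    · subst h0; exact le_refl _
    · exact le_trans (ih ((i - 1) / 2) (by omega) (by omega)) (hv i (by omega) hlen (by omega))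

theorem sul_len (h : List Int) (pos : Nat) : (siftupLoop h pos).1.length = h.length := by
  fun_induction siftupLoop h pos <;> simp_all [List.length_set]

theorem sul_pos (h : List Int) (pos : Nat) (hp : pos < h.length) :
    pos ≤ (siftupLoop h pos).2 ∧ (siftupLoop h pos).2 < h.length ∧
    h.length ≤ 2 * (siftupLoop h pos).2 + 1 ∧ Desc pos (siftupLoop h pos).2 := by
  fun_induction siftupLoop h pos with
  | case1 h pos hlt c ih =>
    have hc : c = 2 * pos + 2 ∧ 2 * pos + 2 < h.length ∨ c = 2 * pos + 1 := by
      simp only [c]; split <;> simp_all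
    have hclen : c < h.length := by omega
    obtain ⟨i1, i2, i3, i4⟩ := ih (by simpa using hclen)
    simp only [List.length_set] at i2 i3
    refine ⟨by omega, i2, i3, desc_trans ?_ i4⟩
    rcases hc with ⟨e, _⟩ | e <;> rw [e]
    · exact Desc.right (Desc.refl pos)
    · exact Desc.left (Desc.refl pos)
  | case2 h pos hlt => exact ⟨le_refl _, hp, by omega, Desc.refl pos⟩

theorem sul_perm (h : List Int) (pos : Nat) (X : Int) (hp : pos < h.length) :
    ((siftupLoop h pos).1.set (siftupLoop h pos).2 X).Perm (h.set pos X) := by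
  fun_induction siftupLoop h pos with
  | case1 h pos hlt c ih =>
    have hc : c = 2 * pos + 2 ∧ 2 * pos + 2 < h.length ∨ c = 2 * pos + 1 := by
      simp only [c]; split <;> simp_all
    have hclen : c < h.length := by omega
    exact (ih (by simpa using hclen)).trans (set_set_perm h pos c X hp hclen (by omega))
  | case2 h pos hlt => exact List.Perm.refl _

theorem getD_set_self (l : List Int) (i : Nat) (v : Int) (h : i < l.length) :
    (l.set i v).getD i 0 = v := by
  simp [List.getD_eq_getElem?_getD, List.getElem?_set_self, h]

theorem getD_set_ne (l : List Int) (i j : Nat) (v : Int) (hij : i ≠ j) :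
    (l.set i v).getD j 0 = l.getD j 0 := by
  simp [List.getD_eq_getElem?_getD, List.getElem?_set_ne hij]

theorem sul_edges (h : List Int) (s' pos : Nat) :
    s' ≤ pos → pos < h.length →
    (∀ c, 1 ≤ c → c < h.length → s' ≤ (c - 1) / 2 → (c - 1) / 2 ≠ pos → Ehp h c) →
    (∀ g, (g = 2 * pos + 1 ∨ g = 2 * pos + 2) → g < h.length → 1 ≤ pos →
      s' ≤ (pos - 1) / 2 → h.getD ((pos - 1) / 2) 0 ≤ h.getD g 0) →
    ∀ c, 1 ≤ c → c < h.length → s' ≤ (c - 1) / 2 → c ≠ (siftupLoop h pos).2 →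
      Ehp (siftupLoop h pos).1 c := by
  fun_induction siftupLoop h pos with
  | case1 h pos hlt cp ih =>
    intro hsp hp hA hB
    have hcc : (cp = 2 * pos + 2 ∧ 2 * pos + 2 < h.length ∧
        h.getD (2 * pos + 2) 0 ≤ h.getD (2 * pos + 1) 0) ∨
        (cp = 2 * pos + 1 ∧ (2 * pos + 2 < h.length →
          h.getD (2 * pos + 1) 0 < h.getD (2 * pos + 2) 0)) := by
      simp only [cp]; split
      · rename_i hcond; exact Or.inl ⟨rfl, hcond.1, le_of_not_gt hcond.2⟩
      · rename_i hcond
        exact Or.inr ⟨rfl, fun h2 => not_not.mp (fun hn => hcond ⟨h2, hn⟩)⟩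
    have hcp_len : cp < h.length := by omega
    have hcp_gt : pos < cp := by omega
    have minchild : ∀ g, (g = 2 * pos + 1 ∨ g = 2 * pos + 2) → g < h.length →
        h.getD cp 0 ≤ h.getD g 0 := by
      intro g hg hgl
      rcases hcc with ⟨e, hl2, hle⟩ | ⟨e, himp⟩
      · rcases hg with rfl | rfl
        · rw [e]; exact hle
        · rw [e]
      · rcases hg with rfl | rfl
        · rw [e]
        · rw [e]; exact le_of_lt (himp hgl)
    have hA' : ∀ c, 1 ≤ c → c < (h.set pos (h.getD cp 0)).length → s' ≤ (c - 1) / 2 →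
        (c - 1) / 2 ≠ cp → Ehp (h.set pos (h.getD cp 0)) c := by
      intro c hc1 hclen hcs hcne
      simp only [List.length_set] at hclen
      by_cases hpar : (c - 1) / 2 = pos
      · rw [Ehp, hpar, getD_set_self _ _ _ hp, getD_set_ne _ _ _ _ (by omega)]
        exact minchild c (by omega) hclen
      · by_cases hcp2 : c = pos
        · subst hcp2
          rw [Ehp, getD_set_ne _ _ _ _ (by omega), getD_set_self _ _ _ hp]
          have := hB cp (by omega) hcp_len hc1 hcs
          exact this
        · rw [Ehp, getD_set_ne _ _ _ _ (by omega), getD_set_ne _ _ _ _ (by omega)]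
          exact hA c hc1 hclen hcs hpar
    have hB' : ∀ g, (g = 2 * cp + 1 ∨ g = 2 * cp + 2) →
        g < (h.set pos (h.getD cp 0)).length → 1 ≤ cp → s' ≤ (cp - 1) / 2 →
        (h.set pos (h.getD cp 0)).getD ((cp - 1) / 2) 0 ≤
          (h.set pos (h.getD cp 0)).getD g 0 := by
      intro g hg hglen _ _
      simp only [List.length_set] at hglen
      have hcppar : (cp - 1) / 2 = pos := by omega
      rw [hcppar, getD_set_self _ _ _ hp, getD_set_ne _ _ _ _ (by omega)]
      have hgpar : (g - 1) / 2 = cp := by omega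
      have hEg := hA g (by omega) hglen (by omega) (by omega)
      rw [Ehp, hgpar] at hEg
      exact hEg
    intro c hc1 hcl hcs hcne
    exact ih (by omega) (by simpa [List.length_set] using hcp_len) hA' hB' c hc1
      (by simpa [List.length_set] using hcl) hcs hcne
  | case2 h pos hlt =>
    intro hsp hp hA hB
    intro c hc1 hcl hcs hcne
    exact hA c hc1 hcl hcs (by omega)

theorem sdl_len (h : List Int) (s pos : Nat) (item : Int) :
    (siftdownLoop h s pos item).1.length = h.length := by
  fun_induction siftdownLoop h s pos item <;> simp_all [List.length_set]

theorem sdl_perm (h : List Int) (s pos : Nat) (item : Int) (X : Int) (hp : pos < h.length) :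
    ((siftdownLoop h s pos item).1.set (siftdownLoop h s pos item).2 X).Perm (h.set pos X) := by
  fun_induction siftdownLoop h s pos item with
  | case1 heap pos hlt pp par hif ih =>
    have hpp : pp = (pos - 1) / 2 := rfl
    exact (ih (by simp only [List.length_set]; omega)).trans
      (set_set_perm heap pos pp X hp (by omega) (by omega))
  | case2 heap pos hlt pp par hif => exact List.Perm.refl _
  | case3 heap pos hlt => exact List.Perm.refl _

theorem sdl_edges (h : List Int) (s pos : Nat) (item : Int) :
    Desc s pos → pos < h.length →
    (∀ c, 1 ≤ c → c < h.length → s ≤ (c - 1) / 2 → c ≠ pos → Ehp h c) →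
    (∀ g, (g = 2 * pos + 1 ∨ g = 2 * pos + 2) → g < h.length → item ≤ h.getD g 0) →
    (∀ g, (g = 2 * pos + 1 ∨ g = 2 * pos + 2) → g < h.length → s < pos →
      h.getD ((pos - 1) / 2) 0 ≤ h.getD g 0) →
    ∀ c, 1 ≤ c → c < h.length → s ≤ (c - 1) / 2 →
      Ehp ((siftdownLoop h s pos item).1.set (siftdownLoop h s pos item).2 item) c := by
  fun_induction siftdownLoop h s pos item with
  | case1 h pos hlt pp par hif ih =>
    intro hd hp hb hc hd2
    have hpp : pp = (pos - 1) / 2 := rfl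
    have hpar : par = h.getD pp 0 := rfl
    have hdpp : Desc s pp := hpp ▸ desc_parent hd hlt
    have hspp : s ≤ pp := desc_le hdpp
    have hb' : ∀ c, 1 ≤ c → c < (h.set pos par).length → s ≤ (c - 1) / 2 →
        c ≠ pp → Ehp (h.set pos par) c := by
      intro c hc1 hcl hcs hcne
      simp only [List.length_set] at hcl
      by_cases hcpos : c = pos
      · subst hcpos
        rw [Ehp, ← hpp, getD_set_ne _ _ _ _ (by omega), getD_set_self _ _ _ hp, ← hpar]
      · by_cases hcchild : (c - 1) / 2 = pos
        · rw [Ehp, hcchild, getD_set_self _ _ _ hp, getD_set_ne _ _ _ _ (by omega)]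
          exact hd2 c (by omega) hcl hlt
        · rw [Ehp, getD_set_ne _ _ _ _ (by omega), getD_set_ne _ _ _ _ (by omega)]
          exact hb c hc1 hcl hcs hcpos
    have hc' : ∀ g, (g = 2 * pp + 1 ∨ g = 2 * pp + 2) → g < (h.set pos par).length →
        item ≤ (h.set pos par).getD g 0 := by
      intro g hg hgl
      simp only [List.length_set] at hgl
      by_cases hgpos : g = pos
      · subst hgpos
        rw [getD_set_self _ _ _ hp]
        exact le_of_lt hif
      · rw [getD_set_ne _ _ _ _ (by omega)]
        have hgpar : (g - 1) / 2 = pp := by omega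
        have := hb g (by omega) hgl (by omega) hgpos
        rw [Ehp, hgpar] at this
        exact le_trans (le_of_lt hif) (le_trans (le_of_eq hpar) this)
    have hd2' : ∀ g, (g = 2 * pp + 1 ∨ g = 2 * pp + 2) → g < (h.set pos par).length →
        s < pp → (h.set pos par).getD ((pp - 1) / 2) 0 ≤ (h.set pos par).getD g 0 := by
      intro g hg hgl hspp2
      simp only [List.length_set] at hgl
      have hdppp : Desc s ((pp - 1) / 2) := desc_parent hdpp hspp2
      have hsppp : s ≤ (pp - 1) / 2 := desc_le hdppp
      have hEpp := hb pp (by omega) (by omega) hsppp (by omega)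
      rw [Ehp] at hEpp
      rw [getD_set_ne _ _ _ _ (by omega)]
      by_cases hgpos : g = pos
      · subst hgpos
        rw [getD_set_self _ _ _ hp, ← hpar] at *
        exact le_trans hEpp (le_of_eq hpar)
      · rw [getD_set_ne _ _ _ _ (by omega)]
        have hgpar : (g - 1) / 2 = pp := by omega
        have hEg := hb g (by omega) hgl (by omega) hgpos
        rw [Ehp, hgpar] at hEg
        exact le_trans hEpp hEg
    intro c hc1 hcl hcs
    exact ih hdpp (by simp only [List.length_set]; omega) hb' hc' hd2' c hc1
      (by simpa [List.length_set] using hcl) hcs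
  | case2 h pos hlt pp par hif =>
    intro hd hp hb hc hd2
    intro c hc1 hcl hcs
    by_cases hcpos : c = pos
    · rw [Ehp, hcpos, getD_set_ne _ _ _ _ (by omega), getD_set_self _ _ _ hp]
      exact le_of_not_gt hif
    · by_cases hcchild : (c - 1) / 2 = pos
      · rw [Ehp, hcchild, getD_set_self _ _ _ hp, getD_set_ne _ _ _ _ (by omega)]
        exact hc c (by omega) hcl
      · rw [Ehp, getD_set_ne _ _ _ _ (by omega), getD_set_ne _ _ _ _ (by omega)]
        exact hb c hc1 hcl hcs hcpos
  | case3 h pos hlt =>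
    intro hd hp hb hc hd2
    intro c hc1 hcl hcs
    have hps : pos = s := by have := desc_le hd; omega
    subst hps
    by_cases hcchild : (c - 1) / 2 = pos
    · rw [Ehp, hcchild, getD_set_self _ _ _ hp, getD_set_ne _ _ _ _ (by omega)]
      exact hc c (by omega) hcl
    · rw [Ehp, getD_set_ne _ _ _ _ (by omega), getD_set_ne _ _ _ _ (by omega)]
      exact hb c hc1 hcl hcs (by omega)

theorem set_getD_self (l : List Int) (i : Nat) (h : i < l.length) :
    l.set i (l.getD i 0) = l := by
  rw [List.getD_eq_getElem l 0 h]
  exact List.set_getElem_self h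

theorem siftup_spec (h : List Int) (s : Nat) (hs : s < h.length) (hpv : PV h (s + 1)) :
    (siftup h s).length = h.length ∧ (siftup h s).Perm h ∧ PV (siftup h s) s := by
  obtain ⟨hle, hlt2, hleaf, hdesc⟩ := sul_pos h s hs
  have hrlen : (siftupLoop h s).1.length = h.length := sul_len h s
  set item := h.getD s 0 with hitem
  set r := siftupLoop h s with hr
  set g := r.1.set r.2 item with hg
  have hglen : g.length = h.length := by simp [hg, hrlen]
  have hr2g : r.2 < g.length := by omega
  have hnew : g.getD r.2 0 = item := getD_set_self _ _ _ (by omega)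
  have e1 : siftup h s =
      (siftdownLoop g s r.2 (g.getD r.2 0)).1.set
        (siftdownLoop g s r.2 (g.getD r.2 0)).2 (g.getD r.2 0) := rfl
  rw [e1, hnew]
  have hb : ∀ c, 1 ≤ c → c < g.length → s ≤ (c - 1) / 2 → c ≠ r.2 → Ehp g c := by
    intro c hc1 hcl hcs hcne
    have hparne : (c - 1) / 2 ≠ r.2 := by omega
    rw [Ehp, hg, getD_set_ne _ _ _ _ (Ne.symm hparne), getD_set_ne _ _ _ _ (Ne.symm hcne)]
    have hA : ∀ c, 1 ≤ c → c < h.length → s ≤ (c - 1) / 2 → (c - 1) / 2 ≠ s → Ehp h c :=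
      fun c hc1 hcl hcs hne => hpv c hc1 hcl (by omega)
    have hB : ∀ g2, (g2 = 2 * s + 1 ∨ g2 = 2 * s + 2) → g2 < h.length → 1 ≤ s →
        s ≤ (s - 1) / 2 → h.getD ((s - 1) / 2) 0 ≤ h.getD g2 0 := by
      intro g2 hg2 hgl hp1 hsle
      exact absurd hsle (by omega)
    exact sul_edges h s s (le_refl s) hs hA hB c hc1 (by omega) hcs hcne
  have hcv : ∀ g2, (g2 = 2 * r.2 + 1 ∨ g2 = 2 * r.2 + 2) → g2 < g.length →
      item ≤ g.getD g2 0 := by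
    intro g2 hg2 hgl
    exact absurd hgl (by omega)
  have hd2v : ∀ g2, (g2 = 2 * r.2 + 1 ∨ g2 = 2 * r.2 + 2) → g2 < g.length → s < r.2 →
      g.getD ((r.2 - 1) / 2) 0 ≤ g.getD g2 0 := by
    intro g2 hg2 hgl _
    exact absurd hgl (by omega)
  refine ⟨by simp [List.length_set, sdl_len, hglen], ?_, ?_⟩
  · have p1 := sdl_perm g s r.2 item item hr2g
    have e2 : g.set r.2 item = g := by rw [hg, List.set_set]
    have p2 := sul_perm h s item hs
    rw [e2] at p1
    have e3 : h.set s item = h := set_getD_self h s hs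
    rw [e3] at p2
    exact p1.trans (p2)
  · intro c hc1 hcl hcs
    have hcl' : c < g.length := by
      simpa [List.length_set, sdl_len, hglen] using hcl
    exact sdl_edges g s r.2 item hdesc hr2g hb hcv hd2v c hc1 hcl' hcs

theorem heapify_aux (n : Nat) : ∀ (m : Nat) (h : List Int), h.length = n → 2 * m ≤ n → PV h m →
    ((List.range m).reverse.foldl (fun h i => siftup h i) h).length = n ∧
    ((List.range m).reverse.foldl (fun h i => siftup h i) h).Perm h ∧
    PV ((List.range m).reverse.foldl (fun h i => siftup h i) h) 0 := by
  intro m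
  induction m with
  | zero => intro h hlen _ hpv; exact ⟨hlen, List.Perm.refl _, hpv⟩
  | succ m ih =>
    intro h hlen hm hpv
    rw [List.range_succ, List.reverse_append, List.reverse_singleton, List.singleton_append,
      List.foldl_cons]
    obtain ⟨l1, p1, v1⟩ := siftup_spec h m (by omega) hpv
    obtain ⟨l2, p2, v2⟩ := ih (siftup h m) (by omega) (by omega)
      (fun c hc1 hcl hcs => v1 c hc1 hcl (by omega))
    exact ⟨l2, p2.trans p1, v2⟩

theorem heapify_spec (x : List Int) :
    (heapify x).length = x.length ∧ (heapify x).Perm x ∧ PV (heapify x) 0 := by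
  have hpv : PV x (x.length / 2) := by
    intro c hc1 hcl hcs
    exfalso; omega
  exact heapify_aux x.length (x.length / 2) x rfl (by omega) hpv

theorem pushpop_spec (q : List Int) (x : Int) (hv : PV q 0) :
    PV (heappushpop q x).1 0 ∧ (x :: q).Perm ((heappushpop q x).2 :: (heappushpop q x).1) ∧
    ∀ y ∈ x :: q, (heappushpop q x).2 ≤ y := by
  have hmem : ∀ y ∈ q, q.getD 0 0 ≤ y := by
    intro y hy
    obtain ⟨i, hi, rfl⟩ := List.mem_iff_getElem.mp hy
    rw [← List.getD_eq_getElem q 0 hi]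
    exact root_min hv i hi
  by_cases hcond : q ≠ [] ∧ q.getD 0 0 < x
  · have hq0 : 0 < q.length := List.length_pos_iff.mpr hcond.1
    have e : heappushpop q x = (siftup (q.set 0 x) 0, q.getD 0 0) := by
      rw [heappushpop, if_pos hcond]
    rw [e]
    have hpv1 : PV (q.set 0 x) 1 := by
      intro c hc1 hcl hcs
      simp only [List.length_set] at hcl
      rw [Ehp, getD_set_ne _ _ _ _ (by omega), getD_set_ne _ _ _ _ (by omega)]
      exact hv c hc1 hcl (by omega)
    obtain ⟨l1, p1, v1⟩ := siftup_spec (q.set 0 x) 0 (by simpa using hq0) hpv1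
    refine ⟨v1, ?_, ?_⟩
    · exact ((getD_cons_set_perm q 0 x hq0).symm.trans (p1.symm.cons _)).symm.symm
    · intro y hy
      rcases List.mem_cons.mp hy with rfl | hy
      · exact le_of_lt hcond.2
      · exact hmem y hy
  · have e : heappushpop q x = (q, x) := by rw [heappushpop, if_neg hcond]
    rw [e]
    refine ⟨hv, List.Perm.refl _, ?_⟩
    intro y hy
    rcases List.mem_cons.mp hy with rfl | hy
    · exact le_refl y
    · rcases List.eq_nil_or_concat q with rfl | _
      · simp at hy
      · have hq : q = [] ∨ x ≤ q.getD 0 0 := by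
          by_cases hn : q = []
          · exact Or.inl hn
          · exact Or.inr (le_of_not_gt (fun hlt => hcond ⟨hn, hlt⟩))
        rcases hq with rfl | hle
        · simp at hy
        · exact le_trans hle (hmem y hy)

theorem min_unique {M M' : List Int} (h : M.Perm M') {u w : Int}
    (hu : u ∈ M) (hlu : ∀ y ∈ M, u ≤ y) (hw : w ∈ M') (hlw : ∀ y ∈ M', w ≤ y) : u = w :=
  le_antisymm (hlu w (h.symm.subset hw)) (hlw u (h.subset hu))

theorem msort_pairwise (l : List Int) : (msort l).Pairwise (· ≤ ·) := by
  simpa using PySem.List.sorted_pairwise l id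

theorem msort_perm (l : List Int) : (msort l).Perm l := PySem.List.sorted_perm l id false

theorem sorted_split (s : List Int) (x : Int) (hp : s.Pairwise (· ≤ ·)) :
    (∀ y ∈ s.take (s.countP (fun y => decide (y < x))), y < x) ∧
    (∀ y ∈ s.drop (s.countP (fun y => decide (y < x))), x ≤ y) := by
  induction s with
  | nil => simp
  | cons a t ih =>
    obtain ⟨hat, hpt⟩ := List.pairwise_cons.mp hp
    by_cases ha : a < x
    · obtain ⟨ih1, ih2⟩ := ih hpt
      simp only [List.countP_cons, ha, decide_true, if_pos, List.take_succ_cons,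
        List.drop_succ_cons]
      refine ⟨?_, ih2⟩
      intro y hy
      rcases List.mem_cons.mp hy with rfl | hy
      · exact ha
      · exact ih1 y hy
    · have h0 : t.countP (fun y => decide (y < x)) = 0 := by
        rw [List.countP_eq_zero]
        intro y hy
        simp only [decide_eq_true_eq]
        have := hat y hy
        omega
      simp only [List.countP_cons, h0, ha, decide_false, if_neg, List.take_zero,
        List.drop_zero]
      constructor
      · intro y hy; simp at hy
      · intro y hy
        rcases List.mem_cons.mp hy with rfl | hy
        · omega
        · have := hat y hy; omega

theorem msort_append (P : List Int) (x : Int) :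
    msort (P ++ [x]) =
      (msort P).take ((msort P).countP (fun y => decide (y < x))) ++
        x :: (msort P).drop ((msort P).countP (fun y => decide (y < x))) := by
  set s := msort P with hs
  set i := s.countP (fun y => decide (y < x)) with hi
  obtain ⟨hlt, hge⟩ := sorted_split s x (msort_pairwise P)
  have hperm : (msort (P ++ [x])).Perm (s.take i ++ x :: s.drop i) := by
    refine (msort_perm (P ++ [x])).trans ?_
    refine ((List.perm_append_singleton x P).trans ?_).trans List.perm_middle.symm
    exact ((msort_perm P).symm.cons x).trans (by rw [List.take_append_drop])
  have hpair2 : (s.take i ++ x :: s.drop i).Pairwise (· ≤ ·) := by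
    rw [List.pairwise_append]
    refine ⟨(msort_pairwise P).sublist (List.take_sublist _ _), ?_, ?_⟩
    · rw [List.pairwise_cons]
      exact ⟨hge, (msort_pairwise P).sublist (List.drop_sublist _ _)⟩
    · intro a ha b hb
      rcases List.mem_cons.mp hb with rfl | hb
      · exact le_of_lt (hlt a ha)
      · exact le_trans (le_of_lt (hlt a ha)) (hge b hb)
  exact List.Perm.eq_of_pairwise (fun a b _ _ h1 h2 => le_antisymm h1 h2)
    (msort_pairwise (P ++ [x])) hpair2 hperm

theorem key (P : List Int) (x : Int) (t : Nat) (ht : t ≤ P.length) :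
    ∃ v : Int,
      ((msort (P ++ [x])).take (t + 1)).sum = ((msort P).take t).sum + v ∧
      (∀ y ∈ x :: (msort P).drop t, v ≤ y) ∧
      (x :: (msort P).drop t).Perm (v :: (msort (P ++ [x])).drop (t + 1)) := by
  set s := msort P with hs
  set i := s.countP (fun y => decide (y < x)) with hi
  have hslen : s.length = P.length := PySem.List.length_sorted P id false
  have hil : i ≤ s.length := List.countP_le_length
  obtain ⟨hlt, hge⟩ := sorted_split s x (msort_pairwise P)
  have hins : msort (P ++ [x]) = s.take i ++ x :: s.drop i := msort_append P x
  have hlti : (s.take i).length = i := by simp; omega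
  by_cases hit : i ≤ t
  · have e2 : (msort (P ++ [x])).drop (t + 1) = s.drop t := by
      rw [hins, List.drop_append, hlti, List.drop_of_length_le (by omega)]
      have e : t + 1 - i = (t - i) + 1 := by omega
      rw [e, List.nil_append, List.drop_succ_cons, List.drop_drop]
      congr 1; omega
    refine ⟨x, ?_, ?_, ?_⟩
    · have e1 : (msort (P ++ [x])).take (t + 1) = s.take i ++ x :: (s.drop i).take (t - i) := by
        rw [hins, List.take_append, hlti, List.take_of_length_le (by omega)]
        have e : t + 1 - i = (t - i) + 1 := by omega
        rw [e, List.take_succ_cons]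
      have e3 : s.take t = s.take i ++ (s.drop i).take (t - i) := by
        conv_lhs => rw [show t = i + (t - i) by omega]
        exact List.take_add
      rw [e1, e3]
      simp [List.sum_append]
      ring
    · intro y hy
      rcases List.mem_cons.mp hy with rfl | hy
      · exact le_refl y
      · have : y ∈ s.drop i := by
          have e : s.drop t = (s.drop i).drop (t - i) := by
            rw [List.drop_drop]; congr 1; omega
          rw [e] at hy
          exact List.mem_of_mem_drop hy
        exact hge y this
    · rw [e2]
  · have htlen : t < s.length := by omega
    have e1 : (msort (P ++ [x])).take (t + 1) = s.take (t + 1) := by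
      rw [hins, List.take_append_of_le_length (by omega)]
      rw [List.take_take, Nat.min_eq_left (by omega)]
    have etk : s.take (t + 1) = s.take t ++ [s[t]] := by
      rw [List.take_succ, List.getElem?_eq_getElem htlen]
      rfl
    have edp : s.drop t = s[t] :: s.drop (t + 1) := List.drop_eq_getElem_cons htlen
    have hmemtk : s[t] ∈ s.take i := by
      have h2 : t < (s.take i).length := by omega
      have := List.getElem_mem h2
      rwa [List.getElem_take] at this
    refine ⟨s[t], ?_, ?_, ?_⟩
    · rw [e1, etk, List.sum_append]; simp
    · intro y hy
      rcases List.mem_cons.mp hy with rfl | hy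
      · exact le_of_lt (hlt _ hmemtk)
      · rw [edp] at hy
        rcases List.mem_cons.mp hy with rfl | hy
        · exact le_refl _
        · have hpd : (s.drop t).Pairwise (· ≤ ·) :=
            (msort_pairwise P).sublist (List.drop_sublist _ _)
          rw [edp] at hpd
          exact (List.pairwise_cons.mp hpd).1 y hy
    · have e2 : (msort (P ++ [x])).drop (t + 1) =
          (s.drop (t + 1)).take (i - (t + 1)) ++ x :: s.drop i := by
        rw [hins, List.drop_append, hlti]
        have e : t + 1 - i = 0 := by omega
        rw [e, List.drop_zero, List.drop_take]
      have eB : s.drop i = (s.drop (t + 1)).drop (i - (t + 1)) := by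
        rw [List.drop_drop]; congr 1; omega
      have p1 : ((s.drop (t + 1)).take (i - (t + 1)) ++ x :: s.drop i).Perm
          (x :: s.drop (t + 1)) := by
        refine List.perm_middle.trans (List.Perm.cons x ?_)
        rw [eB, List.take_append_drop]
      rw [e2, edp]
      exact ((p1.cons s[t]).trans
        ((List.Perm.swap x (s[t]) (s.drop (t + 1))))).symm.symm.symm
theorem loop_eq (n0 k : Int) (enemy : List Int) (hk : 0 ≤ k) :
    ∀ (r : Nat) (q : List Int), k.toNat ≤ r → r ≤ enemy.length →
      PV q 0 → q.Perm ((msort (enemy.take r)).drop (r - k.toNat)) →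
      solLoop q (n0 - ((msort (enemy.take r)).take (r - k.toNat)).sum) enemy
          (PySem.List.pyRange (r : Int) (enemy.length : Int) 1) =
        altLoop n0 k enemy (PySem.List.pyRange (r : Int) (enemy.length : Int) 1) := by
  have main : ∀ (g r : Nat) (q : List Int), enemy.length - r = g → k.toNat ≤ r →
      r ≤ enemy.length → PV q 0 → q.Perm ((msort (enemy.take r)).drop (r - k.toNat)) →
      solLoop q (n0 - ((msort (enemy.take r)).take (r - k.toNat)).sum) enemy
          (PySem.List.pyRange (r : Int) (enemy.length : Int) 1) =
        altLoop n0 k enemy (PySem.List.pyRange (r : Int) (enemy.length : Int) 1) := by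
    intro g
    induction g using Nat.strong_induction_on with
    | _ g ih =>
      intro r q hg hkr hrlen hv hperm
      by_cases hr : r < enemy.length
      · have hcast : ((r : Int) < (enemy.length : Int)) := by exact_mod_cast hr
        rw [PySem.List.pyRange_one_cons hcast]
        simp only [solLoop, altLoop]
        have hx : PySem.List.pyGetD enemy (r : Int) 0 = enemy[r] := by
          rw [PySem.List.pyGetD_natCast, List.getD_eq_getElem enemy 0 hr]
        rw [hx]
        have hPlen : (enemy.take r).length = r := by
          simp [List.length_take]; omega
        obtain ⟨v, hsum, hmin, hkperm⟩ := key (enemy.take r) enemy[r] (r - k.toNat) (by omega)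
        have htk : enemy.take r ++ [enemy[r]] = enemy.take (r + 1) := by
          rw [List.take_succ, List.getElem?_eq_getElem hr]
          rfl
        rw [htk] at hsum hkperm
        obtain ⟨pv2, pperm, pmin⟩ := pushpop_spec q enemy[r] hv
        have hu : (heappushpop q enemy[r]).2 = v := by
          refine min_unique (M := enemy[r] :: q)
            (M' := enemy[r] :: (msort (enemy.take r)).drop (r - k.toNat))
            (hperm.cons _) (pperm.symm.subset (List.mem_cons_self)) pmin
            (hkperm.symm.subset (List.mem_cons_self)) hmin
        have e1 : ((r : Int) + 1).toNat = r + 1 := by omega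
        have e2 : ((r : Int) + 1 - k).toNat = (r + 1) - k.toNat := by omega
        have et : (r + 1) - k.toNat = (r - k.toNat) + 1 := by omega
        have hslice : (PySem.List.slice
              (PySem.List.sorted (PySem.List.slice enemy none (some ((r : Int) + 1))) id false)
              none (some ((r : Int) + 1 - k))).sum
            = ((msort (enemy.take (r + 1))).take ((r + 1) - k.toNat)).sum := by
          rw [PySem.List.slice_to enemy (by omega), PySem.List.slice_to _ (by omega), e1, e2]
          rfl
        rw [hslice]
        by_cases hc : ((msort (enemy.take (r + 1))).take ((r + 1) - k.toNat)).sum > n0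
        · rw [if_pos hc, if_pos]
          rw [hu, et, hsum] at *
          omega
        · rw [if_neg hc, if_neg]
          · have hnext : n0 - ((msort (enemy.take r)).take (r - k.toNat)).sum -
                (heappushpop q enemy[r]).2 =
                n0 - ((msort (enemy.take (r + 1))).take ((r + 1) - k.toNat)).sum := by
              rw [hu, et, hsum]; ring
            have hqperm : (heappushpop q enemy[r]).1.Perm
                ((msort (enemy.take (r + 1))).drop ((r + 1) - k.toNat)) := by
              have h1 : ((heappushpop q enemy[r]).2 :: (heappushpop q enemy[r]).1).Perm
                  (v :: (msort (enemy.take (r + 1))).drop ((r - k.toNat) + 1)) :=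
                pperm.symm.trans ((hperm.cons _).trans hkperm)
              rw [hu] at h1
              rw [et]
              exact h1.cons_inv
            have hcast2 : ((r : Int) + 1) = (((r + 1 : Nat)) : Int) := by push_cast; ring
            rw [hnext, hcast2]
            exact ih (enemy.length - (r + 1)) (by omega) (r + 1)
              (heappushpop q enemy[r]).1 rfl (by omega) (by omega) pv2 hqperm
          · rw [hu, et, hsum] at *
            omega
      · rw [PySem.List.pyRange_one_eq_nil (by exact_mod_cast Nat.le_of_not_lt hr)]
        simp [solLoop, altLoop]
  intro r q hkr hrlen hv hperm
  exact main (enemy.length - r) r q rfl hkr hrlen hv hperm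

-- ===== VERDICT (by name: the statement is the Claim_ definition above) =====
theorem solution_spec : Claim_equal_solution := by
  intro n k enemy _ hpre
  have hk : (0 : Int) ≤ k := hpre
  unfold Spec_solution solution solution_alt
  rw [PySem.List.slice_to enemy hk]
  by_cases hkl : k.toNat ≤ enemy.length
  · have hcast : (k.toNat : Int) = k := Int.toNat_of_nonneg hk
    obtain ⟨hl, hp, hvld⟩ := heapify_spec (enemy.take k.toNat)
    have hperm : (heapify (enemy.take k.toNat)).Perm
        ((msort (enemy.take k.toNat)).drop (k.toNat - k.toNat)) := by
      rw [Nat.sub_self, List.drop_zero]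
      exact hp.trans (msort_perm _).symm
    have h := loop_eq n k enemy hk k.toNat (heapify (enemy.take k.toNat))
      (le_refl _) hkl hvld hperm
    rw [Nat.sub_self, List.take_zero] at h
    simp only [List.sum_nil, sub_zero] at h
    rw [hcast] at h
    exact h
  · rw [PySem.List.pyRange_one_eq_nil (by omega : (enemy.length : Int) ≤ k)]
    simp [solLoop, altLoop]
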